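-- pv_equiv track=rewrite | github.com/YashB63/GFG-Daily-Questions | Day 608/Divisibility/divisibility.py | Count
-- ===== SOURCE A (Python) =====
-- from math import gcd
-- from itertools import combinations
--
-- def Count(nums, k):
--     def lcm(a, b):
--         return a * b // gcd(a, b)
--
--     n = len(nums)
--     res = 0
--
--     for r in range(1, n + 1):
--         for comb in combinations(nums, r):
--             l = comb[0]
--             for num in comb[1:]:
--                 l = lcm(l, num)
--                 if l > k:
--                     break
--             else:
--                 cnt = k // l
--                 if r % 2 == 1:
--                     res += cnt
--                 else:
--                     res -= cnt
--
--     return res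
-- ===== SOURCE B (Python) =====
-- from math import gcd
--
-- def Count(nums, k):
--     # DFS over indices: at each element either skip it or include it in the
--     # current subset, maintaining the running prefix LCM and subset size.
--     def dfs(rest, l, size):
--         if not rest:
--             return 0
--         x, tail = rest[0], rest[1:]
--         total = dfs(tail, l, size)          # skip x
--         if size == 0:
--             l2 = x
--         else:
--             l2 = l * x // gcd(l, x)
--             if l2 > k:
--                 return total                # prune: this subset and all its extensions contribute 0
--         sign = 1 if size % 2 == 0 else -1
--         return total + sign * (k // l2) + dfs(tail, l2, size + 1)
--     return dfs(nums, 0, 0)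
-- ===== Notes on version B (the rewrite author's own statement) =====
-- stated objective: alternative
-- what changed: Replaces A's size-stratified itertools.combinations enumeration (one pass per subset size, rescanning each combination's prefix LCM) by a single recursive skip/include DFS over the list that carries the running prefix LCM down the recursion and prunes a whole subtree as soon as the running LCM of a size-2+ subset exceeds k.
import Mathlib
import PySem

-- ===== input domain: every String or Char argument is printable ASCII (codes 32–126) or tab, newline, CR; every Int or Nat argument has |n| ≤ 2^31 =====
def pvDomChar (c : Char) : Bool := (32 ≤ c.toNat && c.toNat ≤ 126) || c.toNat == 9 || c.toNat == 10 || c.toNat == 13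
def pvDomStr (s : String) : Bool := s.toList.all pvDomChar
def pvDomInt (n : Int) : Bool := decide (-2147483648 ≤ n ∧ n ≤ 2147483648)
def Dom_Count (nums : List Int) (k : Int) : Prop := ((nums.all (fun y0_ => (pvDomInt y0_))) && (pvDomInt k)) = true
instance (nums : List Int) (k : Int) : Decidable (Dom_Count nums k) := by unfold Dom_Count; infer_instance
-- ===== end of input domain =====

-- B replaces A's size-stratified itertools.combinations enumeration by a skip/include DFS
-- over the list that carries the running prefix LCM and prunes subtrees whose running LCM
-- already exceeds k (objective: alternative decomposition; same value wherever A returns).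

-- ===== PORT A =====
-- lcm(a, b) = a * b // gcd(a, b)  (Python floor division; math.gcd is nonnegative = Int.gcd)
def pyLcm (a b : Int) : Int := PySem.Int.floordiv (a * b) ((Int.gcd a b : Nat) : Int)

-- itertools.combinations(xs, r) (as lists, in itertools order)
def combos : List Int → Nat → List (List Int)
  | _, 0 => [[]]
  | [], _ + 1 => []
  | x :: xs, r + 1 => (combos xs r).map (fun c => x :: c) ++ combos xs (r + 1)

-- the inner 'for num in comb[1:]' loop of A: running lcm with the for-else break
-- (none = the break fired, the combination contributes nothing)
def scanA (k : Int) : Int → List Int → Option Int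
  | l, [] => some l
  | l, x :: xs =>
      let l2 := pyLcm l x
      if l2 > k then none else scanA k l2 xs

-- contribution of one combination comb (A's loop body): 0 on break, else ±(k // l)
def contribA (k : Int) (r : Nat) (c : List Int) : Int :=
  match c with
  | [] => 0
  | l :: rest =>
      match scanA k l rest with
      | none => 0
      | some lf =>
          let cnt := PySem.Int.floordiv k lf
          if r % 2 = 1 then cnt else -cnt

def Count (nums : List Int) (k : Int) : Int :=
  (List.range nums.length).foldl
    (fun res i =>
      (combos nums (i + 1)).foldl (fun res c => res + contribA k (i + 1) c) res) 0

-- ===== PORT B =====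
-- dfs(rest, l, size) of Source B: skip rest[0], or include it (updating the running lcm),
-- pruning the whole subtree when the running lcm of a subset of size ≥ 2 exceeds k
def dfsB (k : Int) : List Int → Int → Nat → Int
  | [], _, _ => 0
  | x :: tail, l, size =>
      let total := dfsB k tail l size
      if size = 0 then
        total + (if size % 2 = 0 then (1 : Int) else -1) * PySem.Int.floordiv k x
          + dfsB k tail x (size + 1)
      else
        let l2 := PySem.Int.floordiv (l * x) ((Int.gcd l x : Nat) : Int)
        if l2 > k then total
        else
          total + (if size % 2 = 0 then (1 : Int) else -1) * PySem.Int.floordiv k l2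
            + dfsB k tail l2 (size + 1)

def Count_alt (nums : List Int) (k : Int) : Int := dfsB k nums 0 0

-- ===== PRECONDITION & SPEC =====
-- Pre_ excludes exactly the inputs on which the Python A raises: if 0 ∈ nums, the size-1
-- combination (0,) computes k // 0 and A raises ZeroDivisionError (B raises there too).
def Pre_Count (nums : List Int) (k : Int) : Prop := (0 : Int) ∉ nums
instance (nums : List Int) (k : Int) : Decidable (Pre_Count nums k) := by unfold Pre_Count; infer_instance

def pvWitness_Count : List Int × Int := ([2, 3, 4], 10)

def Spec_Count (nums : List Int) (k : Int) (out : Int) : Prop := out = Count_alt nums k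
instance (nums : List Int) (k : Int) (out : Int) : Decidable (Spec_Count nums k out) := by unfold Spec_Count; infer_instance

-- ===== CLAIM (what is proved, stated in full; the proofs are below) =====
def Claim_equal_Count : Prop := ∀ (nums : List Int) (k : Int), Dom_Count nums k → Pre_Count nums k → Spec_Count nums k (Count nums k)

-- ===== LEMMAS AND PROOFS =====

-- A's prefix scan carrying also the subset size (A checks l > k from the second element on)
def scanT (k : Int) : Int → Nat → List Int → Option (Int × Nat)
  | l, size, [] => some (l, size)
  | l, size, x :: xs =>
      let l2 := if size = 0 then x else pyLcm l x
      if 1 ≤ size ∧ l2 > k then none else scanT k l2 (size + 1) xs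

-- contribution of the subset "prefix with state (l, size), extended by c", sign by final size
def term (k : Int) (l : Int) (size : Nat) (c : List Int) : Int :=
  if c = [] then 0
  else
    match scanT k l size c with
    | none => 0
    | some (lf, sf) =>
        if sf % 2 = 1 then PySem.Int.floordiv k lf else -(PySem.Int.floordiv k lf)

theorem scanT_of_pos (k : Int) : ∀ (rest : List Int) (l : Int) (size : Nat), 1 ≤ size →
    scanT k l size rest = (scanA k l rest).map (fun lf => (lf, size + rest.length)) := by
  intro rest
  induction rest with
  | nil => intro l size h; simp [scanT, scanA]
  | cons x xs ih =>
      intro l size h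
      have hsz : ¬ size = 0 := by omega
      simp only [scanT, scanA, hsz, if_false]
      by_cases hgt : pyLcm l x > k
      · rw [if_pos ⟨h, hgt⟩, if_pos hgt]; rfl
      · rw [if_neg (fun hh => hgt hh.2), if_neg hgt, ih (pyLcm l x) (size+1) (by omega)]
        have e : size + 1 + xs.length = size + (x :: xs).length := by simp; omega
        rw [e]

theorem contribA_eq_term (k : Int) (r : Nat) (c : List Int) (hc : c.length = r) :
    contribA k r c = term k 0 0 c := by
  cases c with
  | nil => simp [contribA, term]
  | cons y rest =>
      simp only [term, contribA, List.cons_ne_nil, if_false]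
      have h1 : scanT k 0 0 (y :: rest) = (scanA k y rest).map (fun lf => (lf, 1 + rest.length)) := by
        simp only [scanT]
        rw [if_neg (by simp)]
        exact scanT_of_pos k rest y 1 (by omega)
      rw [h1]
      cases h2 : scanA k y rest with
      | none => simp
      | some lf =>
          have hr : r % 2 = 1 ↔ (1 + rest.length) % 2 = 1 := by
            simp only [List.length_cons] at hc; omega
          by_cases ho : r % 2 = 1
          · simp [ho, hr.mp ho]
          · have : ¬ (1 + rest.length) % 2 = 1 := fun h => ho (hr.mpr h)
            simp [ho, this]

theorem combos_perm_sublistsLen : ∀ (xs : List Int) (r : Nat),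
    (combos xs r).Perm (List.sublistsLen r xs) := by
  intro xs
  induction xs with
  | nil => intro r; cases r <;> simp [combos]
  | cons x xs ih =>
      intro r
      cases r with
      | zero => simp [combos]
      | succ r =>
          rw [combos, List.sublistsLen_succ_cons]
          exact ((((ih r).map _).append (ih (r+1)))).trans List.perm_append_comm

theorem count_nil_sublists' : ∀ (xs : List Int), (xs.sublists').count ([] : List Int) = 1 := by
  intro xs
  induction xs with
  | nil => simp
  | cons x xs ih =>
      rw [List.sublists'_cons, List.count_append, ih]
      have h0 : (List.map (List.cons x) xs.sublists').count ([] : List Int) = 0 := by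
        rw [List.count_eq_zero]
        simp
      omega

theorem sum_ite_nil (S : Int) : ∀ (L : List (List Int)),
    (L.map (fun c => if c = [] then S else 0)).sum = S * (L.count ([] : List Int)) := by
  intro L
  induction L with
  | nil => simp
  | cons c L ih =>
      by_cases hc : c = []
      · simp [hc, ih]; ring
      · simp [hc, ih]

theorem term_cons (k l : Int) (size : Nat) (x : Int) (c : List Int) :
    term k l size (x :: c) =
      (let l2 := if size = 0 then x else pyLcm l x
       if 1 ≤ size ∧ l2 > k then 0
       else (if c = [] then (if (size + 1) % 2 = 1 then PySem.Int.floordiv k l2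
                             else -(PySem.Int.floordiv k l2)) else 0)
            + term k l2 (size + 1) c) := by
  simp only [term, List.cons_ne_nil, if_false, scanT]
  by_cases hcond : 1 ≤ size ∧ (if size = 0 then x else pyLcm l x) > k
  · rw [if_pos hcond, if_pos hcond]
  · rw [if_neg hcond, if_neg hcond]
    cases c with
    | nil => simp [scanT]
    | cons y rest => simp only [List.cons_ne_nil, if_false, scanT, zero_add]

theorem sgn_eq (size : Nat) (fd : Int) :
    (if (size + 1) % 2 = 1 then fd else -fd) = (if size % 2 = 0 then (1 : Int) else -1) * fd := by
  by_cases h : size % 2 = 0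
  · have h1 : (size + 1) % 2 = 1 := by omega
    simp [h, h1]
  · have h1 : ¬ (size + 1) % 2 = 1 := by omega
    simp [h, h1]

theorem sum_map_cons_term (k l : Int) (size : Nat) (x : Int) (tail : List Int) :
    ((tail.sublists').map (fun c => term k l size (x :: c))).sum =
      (let l2 := if size = 0 then x else pyLcm l x
       if 1 ≤ size ∧ l2 > k then 0
       else (if (size + 1) % 2 = 1 then PySem.Int.floordiv k l2
             else -(PySem.Int.floordiv k l2))
            + ((tail.sublists').map (term k l2 (size + 1))).sum) := by
  by_cases hcond : 1 ≤ size ∧ (if size = 0 then x else pyLcm l x) > k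
  · rw [if_pos hcond]
    rw [List.map_congr_left (fun c _ => by rw [term_cons]; exact if_pos hcond :
        ∀ c ∈ tail.sublists', term k l size (x :: c) = 0)]
    simp
  · simp only [if_neg hcond]
    rw [List.map_congr_left (fun c _ => by rw [term_cons]; simp only [if_neg hcond] :
        ∀ c ∈ tail.sublists', term k l size (x :: c) =
          (if c = [] then (if (size + 1) % 2 = 1 then PySem.Int.floordiv k (if size = 0 then x else pyLcm l x)
                           else -(PySem.Int.floordiv k (if size = 0 then x else pyLcm l x))) else 0)
          + term k (if size = 0 then x else pyLcm l x) (size + 1) c)]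
    rw [PySem.List.sum_map_add_int, sum_ite_nil, count_nil_sublists']
    ring

theorem dfsB_eq_sum (k : Int) : ∀ (xs : List Int) (l : Int) (size : Nat),
    dfsB k xs l size = ((xs.sublists').map (term k l size)).sum := by
  intro xs
  induction xs with
  | nil => intro l size; simp [dfsB, term]
  | cons x tail ih =>
      intro l size
      rw [List.sublists'_cons, List.map_append, List.sum_append, List.map_map]
      have hcons : ((tail.sublists').map (term k l size ∘ List.cons x)).sum =
          ((tail.sublists').map (fun c => term k l size (x :: c))).sum := rfl
      rw [hcons, sum_map_cons_term]
      have hfold : PySem.Int.floordiv (l * x) ((Int.gcd l x : Nat) : Int) = pyLcm l x := rfl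
      by_cases hsz : size = 0
      · subst hsz
        simp only [dfsB, reduceIte]
        rw [if_neg (by simp), ih, ih]
        norm_num
        ring
      · simp only [dfsB, hsz, reduceIte, hfold]
        by_cases hgt : pyLcm l x > k
        · rw [if_pos hgt, if_pos (And.intro (by omega) hgt), ih]
          ring
        · rw [if_neg hgt, if_neg (show ¬(1 ≤ size ∧ pyLcm l x > k) from fun hh => hgt hh.2), ih, ih, sgn_eq]
          ring

theorem countA_eq_sum (nums : List Int) (k : Int) :
    Count nums k = ((nums.sublists').map (term k 0 0)).sum := by
  unfold Count
  have h1 : (fun (res : Int) (i : Nat) =>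
        (combos nums (i + 1)).foldl (fun res c => res + contribA k (i + 1) c) res)
      = (fun (res : Int) (i : Nat) =>
        res + ((combos nums (i + 1)).map (contribA k (i + 1))).sum) := by
    funext res i
    exact PySem.List.foldl_add _ _ _
  rw [h1, PySem.List.foldl_add, zero_add]
  have h2 : ∀ i : Nat, ((combos nums (i + 1)).map (contribA k (i + 1))).sum
      = ((List.sublistsLen (i + 1) nums).map (term k 0 0)).sum := by
    intro i
    rw [List.map_congr_left (fun c hc => contribA_eq_term k (i + 1) c
      (List.length_of_sublistsLen ((combos_perm_sublistsLen nums (i + 1)).mem_iff.mp hc)))]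
    exact ((combos_perm_sublistsLen nums (i + 1)).map _).sum_eq
  rw [List.map_congr_left (fun i _ => h2 i)]
  rw [← ((List.range_bind_sublistsLen_perm nums).map (term k 0 0)).sum_eq]
  rw [List.map_flatMap]
  rw [List.flatMap_def, List.sum_flatten, List.map_map]
  rw [List.range_succ_eq_map, List.map_cons, List.sum_cons, List.map_map]
  simp [Function.comp_def, Nat.succ_eq_add_one, term]

theorem count_eq_alt (nums : List Int) (k : Int) : Count nums k = Count_alt nums k := by
  rw [countA_eq_sum, Count_alt, dfsB_eq_sum]

-- ===== VERDICT (by name: the statement is the Claim_ definition above) =====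
theorem Count_spec : Claim_equal_Count := by
  intro nums k _ _
  unfold Spec_Count
  exact count_eq_alt nums k
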